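-- pv_equiv track=rewrite | github.com/n4hy/GnuRadio-SHTUFF | grc/rds_decoder.py | syndrome
-- ===== SOURCE A (Python) =====
-- def syndrome(m):
--     reg = 0
--     for i in range(25, -1, -1):
--         bit = (m >> i) & 0x01
--         reg_msb = (reg >> 9) & 0x01
--         reg = (reg << 1) & 0x3FF
--         if bit ^ reg_msb:
--             reg = reg ^ 0x1B9
--     return reg
-- ===== SOURCE B (Python) =====
-- # Table-driven: syndrome is GF(2)-linear in the message bits; T[i] is the
-- # syndrome of the message with only bit i set (column i of the RDS parity-check
-- # matrix), so we just XOR together the columns selected by m's bits.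
-- _T = [441, 882, 861, 771, 959, 711, 55, 110, 220, 440, 880, 857, 779, 943, 743,
--       119, 238, 476, 952, 713, 43, 86, 172, 344, 688, 217]
--
-- def syndrome(m):
--     reg = 0
--     for i in range(26):
--         if (m >> i) & 1:
--             reg ^= _T[i]
--     return reg
-- ===== Notes on version B (the rewrite author's own statement) =====
-- stated objective: alternative
-- what changed: Replaces the bit-serial LFSR simulation (shift register updated per bit, MSB feedback) with a precomputed 26-entry parity-check-column table XOR-folded against the set bits of m, exploiting GF(2)-linearity of the syndrome.
import Mathlib
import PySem

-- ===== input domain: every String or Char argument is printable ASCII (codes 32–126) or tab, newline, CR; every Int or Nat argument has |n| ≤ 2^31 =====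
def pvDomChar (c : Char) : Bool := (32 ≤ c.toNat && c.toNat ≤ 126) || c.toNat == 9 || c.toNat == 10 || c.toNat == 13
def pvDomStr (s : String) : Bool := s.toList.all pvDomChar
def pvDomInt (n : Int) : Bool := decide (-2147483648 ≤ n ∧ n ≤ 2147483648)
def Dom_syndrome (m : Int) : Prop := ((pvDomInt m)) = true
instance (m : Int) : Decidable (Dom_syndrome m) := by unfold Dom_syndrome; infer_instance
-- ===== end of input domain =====

-- B replaces A's bit-serial LFSR with a XOR-fold of precomputed parity-check columns (alternative algorithm, same cost).

-- (m >> i) & 1 for i ≥ 0, as a Nat (the value is always 0 or 1, so .toNat is exact);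
-- both Pythons compute exactly this expression.
def pvBit (m : Int) (i : Int) : Nat := (PySem.Int.band (m >>> i.toNat) 1).toNat

-- ===== PORT A =====
-- one body of A's loop; reg is always a 10-bit nonnegative int in Python (init 0, masked by 0x3FF), so Nat state is exact
def aStep (m : Int) (reg : Nat) (i : Int) : Nat :=
  let bit := pvBit m i
  let reg_msb := (reg >>> 9) &&& 1
  let reg' := (reg <<< 1) &&& 0x3FF
  if bit ^^^ reg_msb ≠ 0 then reg' ^^^ 0x1B9 else reg'

def syndrome (m : Int) : Int :=
  (((PySem.List.pyRange 25 (-1) (-1)).foldl (aStep m) 0 : Nat) : Int)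

-- ===== PORT B =====
def rdsTable : List Nat :=
  [441, 882, 861, 771, 959, 711, 55, 110, 220, 440, 880, 857, 779, 943, 743,
   119, 238, 476, 952, 713, 43, 86, 172, 344, 688, 217]

-- one body of B's loop: `if (m >> i) & 1: reg ^= _T[i]` (truthiness = nonzero)
def bStep (m : Int) (reg : Nat) (i : Int) : Nat :=
  if pvBit m i ≠ 0 then reg ^^^ PySem.List.pyGetD rdsTable i 0 else reg

def syndrome_alt (m : Int) : Int :=
  (((PySem.List.pyRange 0 26 1).foldl (bStep m) 0 : Nat) : Int)

-- ===== PRECONDITION & SPEC =====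
def Spec_syndrome (m : Int) (out : Int) : Prop := out = syndrome_alt m
instance (m : Int) (out : Int) : Decidable (Spec_syndrome m out) := by unfold Spec_syndrome; infer_instance

-- ===== CLAIM (what is proved, stated in full; the proofs are below) =====
def Claim_equal_syndrome : Prop := ∀ (m : Int), Dom_syndrome m → Spec_syndrome m (syndrome m)

-- ===== LEMMAS AND PROOFS =====

-- the linear part of A's step (what the step does when the incoming message bit is 0)
def pvL (r : Nat) : Nat :=
  ((r <<< 1) &&& 0x3FF) ^^^ (if (r >>> 9) &&& 1 = 1 then 0x1B9 else 0)

theorem pvBit_le_one (m i : Int) : pvBit m i ≤ 1 := by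
  unfold pvBit
  rw [PySem.Int.band_one]
  have h1 := PySem.Int.mod_nonneg (m >>> i.toNat) (b := 2) (by omega)
  have h2 := PySem.Int.mod_lt (m >>> i.toNat) (b := 2) (by omega)
  omega

theorem aStep_eq (m : Int) (i : Int) (reg : Nat) :
    aStep m reg i = pvL reg ^^^ (if pvBit m i = 1 then 0x1B9 else 0) := by
  have hb : pvBit m i = 0 ∨ pvBit m i = 1 := by have := pvBit_le_one m i; omega
  have hm : (reg >>> 9) &&& 1 = 0 ∨ (reg >>> 9) &&& 1 = 1 := by
    have : (reg >>> 9) &&& 1 ≤ 1 := Nat.and_le_right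
    omega
  rcases hb with hb | hb <;> rcases hm with hm | hm <;>
    simp [aStep, pvL, hb, hm, Nat.xor_xor_cancel_right]

theorem pvL_linear (x y : Nat) : pvL (x ^^^ y) = pvL x ^^^ pvL y := by
  unfold pvL
  rw [Nat.shiftLeft_xor_distrib, Nat.and_xor_distrib_right,
      Nat.shiftRight_xor_distrib, Nat.and_xor_distrib_right]
  have hx : (x >>> 9) &&& 1 = 0 ∨ (x >>> 9) &&& 1 = 1 := by
    have : (x >>> 9) &&& 1 ≤ 1 := Nat.and_le_right; omega
  have hy : (y >>> 9) &&& 1 = 0 ∨ (y >>> 9) &&& 1 = 1 := by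
    have : (y >>> 9) &&& 1 ≤ 1 := Nat.and_le_right; omega
  rcases hx with hx | hx <;> rcases hy with hy | hy <;>
    simp [hx, hy, Nat.xor_comm, Nat.xor_left_comm]

theorem pvL_zero : pvL 0 = 0 := by decide

theorem pvL_iter_zero (n : Nat) : pvL^[n] 0 = 0 := by
  induction n with
  | zero => rfl
  | succ n ih => rw [Function.iterate_succ_apply, pvL_zero, ih]

-- A's fold is affine in its initial register (GF(2)-linearity of the LFSR)
theorem foldA_affine (m : Int) (l : List Int) :
    ∀ r s : Nat,
      l.foldl (aStep m) (r ^^^ s) = pvL^[l.length] r ^^^ l.foldl (aStep m) s := by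
  induction l with
  | nil => intro r s; simp
  | cons i l ih =>
      intro r s
      have hstep : aStep m (r ^^^ s) i = pvL r ^^^ aStep m s i := by
        rw [aStep_eq, aStep_eq, pvL_linear, Nat.xor_assoc]
      simp only [List.foldl_cons, hstep, ih (pvL r) (aStep m s i),
        List.length_cons, Function.iterate_succ_apply]

-- the table really holds the iterated-feedback images of the generator 0x1B9
theorem rdsTable_spec : ∀ n : Nat, n < 26 → rdsTable.getD n 0 = pvL^[n] 0x1B9 := by decide

theorem foldA_eq (m : Int) (l : List Int) (r : Nat) :
    l.foldl (aStep m) r = pvL^[l.length] r ^^^ l.foldl (aStep m) 0 := by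
  have h := foldA_affine m l r 0
  rwa [Nat.xor_zero] at h

-- main induction: A over bits n-1..0 equals B over bits 0..n-1, for n ≤ 26
theorem fold_eq (m : Int) :
    ∀ n : Nat, n ≤ 26 →
      (PySem.List.pyRange ((n : Int) - 1) (-1) (-1)).foldl (aStep m) 0 =
      (PySem.List.pyRange 0 (n : Int) 1).foldl (bStep m) 0 := by
  intro n
  induction n with
  | zero =>
      intro _
      rw [PySem.List.pyRange_neg_one_eq_nil (by norm_num),
          PySem.List.pyRange_one_eq_nil (by norm_num)]
      rfl
  | succ n ih =>
      intro hn
      have hn' : n ≤ 26 := by omega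
      have hcast : ((n + 1 : Nat) : Int) - 1 = (n : Int) := by push_cast; ring
      rw [hcast, PySem.List.pyRange_neg_one_cons (by omega),
          show ((n + 1 : Nat) : Int) = (n : Int) + 1 by push_cast; ring,
          PySem.List.pyRange_one_succ_right (by omega),
          List.foldl_append, List.foldl_cons]
      have h0 : aStep m 0 (n : Int) = if pvBit m (n : Int) = 1 then 0x1B9 else 0 := by
        rw [aStep_eq, pvL_zero, Nat.zero_xor]
      rw [h0, foldA_eq m _ _, PySem.List.length_pyRange_neg_one]
      have hlen : ((n : Int) - 1 - -1).toNat = n := by omega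
      rw [hlen, ih hn', List.foldl_cons, List.foldl_nil]
      have hb : pvBit m (n : Int) = 0 ∨ pvBit m (n : Int) = 1 := by
        have := pvBit_le_one m (n : Int); omega
      have htbl : PySem.List.pyGetD rdsTable ((n : Int)) 0 = rdsTable.getD n 0 :=
        PySem.List.pyGetD_natCast rdsTable n 0
      rcases hb with hb | hb
      · simp [bStep, hb, pvL_iter_zero]
      · simp only [bStep, hb, if_pos (by omega : (1:Nat) ≠ 0), htbl,
          rdsTable_spec n (by omega)]
        exact Nat.xor_comm _ _

-- ===== VERDICT (by name: the statement is the Claim_ definition above) =====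
theorem syndrome_spec : Claim_equal_syndrome := by
  intro m _
  unfold Spec_syndrome syndrome syndrome_alt
  have h := fold_eq m 26 (by norm_num)
  norm_num at h
  rw [h]
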